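-- pv_equiv track=rewrite | github.com/FelixWalger/Swarm_split_learning_simulation | MIP_opti.py | partition_blocks_into_L_consecutive_subsets
-- ===== SOURCE A (Python) =====
-- def partition_blocks_into_L_consecutive_subsets(num_blocks, max_L):
--     """
--     Partition the range [0..num_blocks-1] into max_L consecutive non-empty segments.
--     Returns a list of such partitions, each partition is a list [(start, end), (start, end), ...].
--     """
--     results = []
--     def backtrack(start, cuts_left, used_cuts):
--         # If no more cuts left, take [start..num_blocks-1] as final segment
--         if cuts_left == 0:
--             if start < num_blocks:
--                 used_cuts.append((start, num_blocks - 1))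
--                 results.append(used_cuts[:])
--                 used_cuts.pop()
--             return
--         # Try placing a cut in [start+1 .. num_blocks - cuts_left]
--         for cut_pos in range(start+1, num_blocks - cuts_left + 1):
--             used_cuts.append((start, cut_pos - 1))
--             backtrack(cut_pos, cuts_left - 1, used_cuts)
--             used_cuts.pop()
--     backtrack(0, max_L - 1, [])
--     return results
-- ===== SOURCE B (Python) =====
-- def partition_blocks_into_L_consecutive_subsets(num_blocks, max_L):
--     """
--     Partition the range [0..num_blocks-1] into max_L consecutive non-empty segments.
--     Breadth-first: grow the list of interior cut positions level by level, then
--     turn each boundary sequence into segments in one scan (no recursion).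
--     """
--     if max_L < 1 or num_blocks < max_L:
--         return []
--     combos = [[]]
--     for _ in range(max_L - 1):
--         combos = [c + [x] for c in combos
--                   for x in range((c[-1] if c else 0) + 1, num_blocks)]
--     results = []
--     for c in combos:
--         segs = []
--         prev = 0
--         for x in c + [num_blocks]:
--             segs.append((prev, x - 1))
--             prev = x
--         results.append(segs)
--     return results
-- ===== Notes on version B (the rewrite author's own statement) =====
-- stated objective: alternative
-- what changed: Replaces recursive backtracking with a shared mutable accumulator by breadth-first iterative generation of the interior cut positions (grow the cut lists level by level) followed by a single boundary-to-segment scan per combination.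
import Mathlib
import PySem

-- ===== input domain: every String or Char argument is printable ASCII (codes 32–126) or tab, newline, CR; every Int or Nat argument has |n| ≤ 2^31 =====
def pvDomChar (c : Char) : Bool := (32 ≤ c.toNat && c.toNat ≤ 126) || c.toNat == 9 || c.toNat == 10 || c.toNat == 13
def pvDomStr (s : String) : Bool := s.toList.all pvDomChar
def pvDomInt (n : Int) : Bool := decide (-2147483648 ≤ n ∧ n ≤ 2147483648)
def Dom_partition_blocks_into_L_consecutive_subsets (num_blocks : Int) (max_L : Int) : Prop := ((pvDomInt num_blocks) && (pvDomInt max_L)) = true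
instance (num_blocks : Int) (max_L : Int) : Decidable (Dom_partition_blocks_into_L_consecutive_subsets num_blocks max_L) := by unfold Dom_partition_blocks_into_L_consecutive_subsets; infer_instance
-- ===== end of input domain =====

-- B replaces A's recursive backtracking by breadth-first iterative generation of the cut
-- positions plus one boundary scan per combination (alternative decomposition, similar cost).

-- ===== PORT A =====
-- backtrack(start, cuts_left, used_cuts), with the shared 'results' list threaded as state.
-- 'fuel' only makes the recursion total: on Pre_ it never runs out (cuts_left counts down to
-- the 'cuts_left == 0' base case before fuel does, or the loop range is empty).
def btA (nb : Int) (fuel : Nat) (start cutsLeft : Int) (used : List (Int × Int))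
    (results : List (List (Int × Int))) : List (List (Int × Int)) :=
  if cutsLeft = 0 then
    if start < nb then results ++ [used ++ [(start, nb - 1)]] else results
  else
    match fuel with
    | 0 => results
    | f + 1 =>
      (PySem.List.pyRange (start + 1) (nb - cutsLeft + 1) 1).foldl
        (fun res cut => btA nb f cut (cutsLeft - 1) (used ++ [(start, cut - 1)]) res) results

def partition_blocks_into_L_consecutive_subsets (num_blocks : Int) (max_L : Int) :
    List (List (Int × Int)) :=
  btA num_blocks (max_L - 1).toNat 0 (max_L - 1) [] []

-- ===== PORT B =====
-- segs = []; prev = 0; for x in c + [num_blocks]: segs.append((prev, x - 1)); prev = x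
def segsOfB (nb : Int) (c : List Int) : List (Int × Int) :=
  ((c ++ [nb]).foldl (fun (st : List (Int × Int) × Int) x => (st.1 ++ [(st.2, x - 1)], x))
    ([], 0)).1

-- combos = [c + [x] for c in combos for x in range((c[-1] if c else 0) + 1, num_blocks)]
def stepB (nb : Int) (cs : List (List Int)) : List (List Int) :=
  cs.flatMap (fun c => (PySem.List.pyRange ((c.getLast?.getD 0) + 1) nb 1).map (fun x => c ++ [x]))

def partition_blocks_into_L_consecutive_subsets_alt (num_blocks : Int) (max_L : Int) :
    List (List (Int × Int)) :=
  if max_L < 1 ∨ num_blocks < max_L then []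
  else
    let combos := (List.range (max_L - 1).toNat).foldl (fun cs _ => stepB num_blocks cs) [[]]
    combos.foldl (fun res c => res ++ [segsOfB num_blocks c]) []

-- ===== PRECONDITION & SPEC =====
-- Pre_ excludes exactly the inputs where A raises (RecursionError): max_L ≤ 0 with
-- num_blocks ≥ max_L makes backtrack recurse without ever reaching cuts_left == 0.
def Pre_partition_blocks_into_L_consecutive_subsets (num_blocks : Int) (max_L : Int) : Prop :=
  1 ≤ max_L ∨ num_blocks < max_L
instance (num_blocks : Int) (max_L : Int) : Decidable (Pre_partition_blocks_into_L_consecutive_subsets num_blocks max_L) := by unfold Pre_partition_blocks_into_L_consecutive_subsets; infer_instance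

def pvWitness_partition_blocks_into_L_consecutive_subsets : Int × Int := (5, 2)

def Spec_partition_blocks_into_L_consecutive_subsets (num_blocks : Int) (max_L : Int) (out : List (List (Int × Int))) : Prop := out = partition_blocks_into_L_consecutive_subsets_alt num_blocks max_L
instance (num_blocks : Int) (max_L : Int) (out : List (List (Int × Int))) : Decidable (Spec_partition_blocks_into_L_consecutive_subsets num_blocks max_L out) := by unfold Spec_partition_blocks_into_L_consecutive_subsets; infer_instance

-- ===== CLAIM (what is proved, stated in full; the proofs are below) =====
def Claim_equal_partition_blocks_into_L_consecutive_subsets : Prop := ∀ (num_blocks : Int) (max_L : Int), Dom_partition_blocks_into_L_consecutive_subsets num_blocks max_L → Pre_partition_blocks_into_L_consecutive_subsets num_blocks max_L → Spec_partition_blocks_into_L_consecutive_subsets num_blocks max_L (partition_blocks_into_L_consecutive_subsets num_blocks max_L)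

-- ===== LEMMAS AND PROOFS =====

-- the segments of [start..nb-1] determined by the cut positions
def segsFrom (nb : Int) : Int → List Int → List (Int × Int)
  | start, [] => [(start, nb - 1)]
  | start, cut :: rest => (start, cut - 1) :: segsFrom nb cut rest

-- A's search tree as a pure list of cut-position lists (tight bounds, leaf check)
def specA (nb : Int) : Int → Nat → List (List Int)
  | start, 0 => if start < nb then [[]] else []
  | start, c + 1 =>
    (PySem.List.pyRange (start + 1) (nb - c) 1).flatMap
      (fun cut => (specA nb cut c).map (cut :: ·))

-- prepend-style combinations with the loose bound (cut < nb), as B generates them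
def combL (nb : Int) : Int → Nat → List (List Int)
  | _, 0 => [[]]
  | start, j + 1 =>
    (PySem.List.pyRange (start + 1) nb 1).flatMap
      (fun x => (combL nb x j).map (x :: ·))

lemma btA_eq_specA (nb : Int) (c : Nat) :
    ∀ (start : Int) (used : List (Int × Int)) (results : List (List (Int × Int))),
    btA nb c start (c : Int) used results
      = results ++ (specA nb start c).map (fun cuts => used ++ segsFrom nb start cuts) := by
  induction c with
  | zero =>
    intro start used results
    by_cases h : start < nb
    · simp [btA, specA, h, segsFrom]
    · simp [btA, specA, h]
  | succ c ih =>
    intro start used results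
    rw [btA]
    have h0 : ¬ ((c + 1 : Nat) : Int) = 0 := by push_cast; omega
    simp only [h0, if_false]
    have h1 : ((c + 1 : Nat) : Int) - 1 = (c : Int) := by push_cast; ring
    have h2 : nb - ((c + 1 : Nat) : Int) + 1 = nb - (c : Int) := by push_cast; ring
    simp only [h1, h2, ih]
    rw [PySem.List.foldl_append_eq_flatMap]
    simp only [specA, List.map_flatMap, List.map_map]
    congr 1
    apply List.flatMap_congr
    intro cut _
    simp [Function.comp, segsFrom]

lemma combL_extend (nb : Int) (j : Nat) :
    ∀ start : Int,
    combL nb start (j + 1)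
      = (combL nb start j).flatMap
          (fun c => (PySem.List.pyRange ((c.getLast?.getD start) + 1) nb 1).map (fun x => c ++ [x])) := by
  induction j with
  | zero =>
    intro start
    simp [combL, List.map_eq_flatMap]
  | succ j ih =>
    intro start
    conv_lhs => rw [combL]
    conv_rhs => rw [combL]
    simp only [ih]
    simp only [List.flatMap_assoc, List.flatMap_map]
    apply List.flatMap_congr
    intro x _
    rw [List.map_flatMap]
    apply List.flatMap_congr
    intro c _
    have hlast : (x :: c).getLast?.getD start = c.getLast?.getD x := by
      cases c with
      | nil => simp
      | cons a t =>
        rw [List.getLast?_cons_cons]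
        cases h : (a :: t).getLast? with
        | none => simp at h
        | some v => simp
    simp [hlast, Function.comp]

lemma fold_stepB_eq_combL (nb : Int) (k : Nat) :
    (List.range k).foldl (fun cs _ => stepB nb cs) [[]] = combL nb 0 k := by
  induction k with
  | zero => simp [combL]
  | succ k ih =>
    rw [List.range_succ, List.foldl_append]
    simp only [List.foldl_cons, List.foldl_nil, ih]
    rw [combL_extend]
    rfl

lemma combL_eq_nil (nb : Int) (c : Nat) :
    ∀ start : Int, 1 ≤ c → nb - c ≤ start → combL nb start c = [] := by
  induction c with
  | zero => intro _ h; omega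
  | succ c ih =>
    intro start _ hle
    rw [combL]
    rcases Nat.eq_zero_or_pos c with hc | hc
    · subst hc
      rw [PySem.List.pyRange_one_eq_nil (by push_cast at hle ⊢; omega)]
      rfl
    · apply List.flatMap_eq_nil_iff.mpr
      intro x hx
      rw [PySem.List.mem_pyRange_one] at hx
      rw [ih x hc (by push_cast at hle ⊢; omega)]
      rfl

lemma specA_eq_combL (nb : Int) (c : Nat) :
    ∀ start : Int, 1 ≤ c → specA nb start c = combL nb start c := by
  induction c with
  | zero => intro _ h; omega
  | succ c ih =>
    intro start _
    rw [specA, combL]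
    rcases Nat.eq_zero_or_pos c with hc | hc
    · subst hc
      simp only [Nat.cast_zero, sub_zero]
      apply List.flatMap_congr
      intro cut hcut
      rw [PySem.List.mem_pyRange_one] at hcut
      simp [specA, combL, hcut.2]
    · by_cases hsp : start + 1 ≤ nb - c
      · rw [PySem.List.pyRange_one_append (start + 1) (nb - c) nb hsp (by omega)]
        rw [List.flatMap_append]
        have hdead : (PySem.List.pyRange (nb - (c : Int)) nb 1).flatMap
            (fun x => (combL nb x c).map (x :: ·)) = [] := by
          apply List.flatMap_eq_nil_iff.mpr
          intro x hx
          rw [PySem.List.mem_pyRange_one] at hx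
          rw [combL_eq_nil nb c x hc (by omega)]
          rfl
        rw [hdead, List.append_nil]
        apply List.flatMap_congr
        intro cut _
        rw [ih cut hc]
      · rw [PySem.List.pyRange_one_eq_nil (by omega)]
        symm
        apply List.flatMap_eq_nil_iff.mpr
        intro x hx
        rw [PySem.List.mem_pyRange_one] at hx
        rw [combL_eq_nil nb c x hc (by omega)]
        rfl

lemma segs_scan (nb : Int) (c : List Int) :
    ∀ (prev : Int) (segs : List (Int × Int)),
    (c ++ [nb]).foldl (fun (st : List (Int × Int) × Int) x => (st.1 ++ [(st.2, x - 1)], x))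
      (segs, prev) = (segs ++ segsFrom nb prev c, nb) := by
  induction c with
  | nil => intro prev segs; simp [segsFrom]
  | cons cut rest ih =>
    intro prev segs
    simp only [List.cons_append, List.foldl_cons, ih, segsFrom, List.append_assoc]
    simp

lemma segsOfB_eq_segsFrom (nb : Int) (c : List Int) : segsOfB nb c = segsFrom nb 0 c := by
  rw [segsOfB, segs_scan]
  simp

-- ===== VERDICT (by name: the statement is the Claim_ definition above) =====
theorem partition_blocks_into_L_consecutive_subsets_spec : Claim_equal_partition_blocks_into_L_consecutive_subsets := by
  intro nb mL _ hpre
  unfold Spec_partition_blocks_into_L_consecutive_subsets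
  unfold partition_blocks_into_L_consecutive_subsets partition_blocks_into_L_consecutive_subsets_alt
  by_cases h1 : 1 ≤ mL
  · obtain ⟨k, hk2⟩ : ∃ k : Nat, mL - 1 = (k : Int) :=
      ⟨(mL - 1).toNat, (Int.toNat_of_nonneg (by omega)).symm⟩
    rw [hk2]
    simp only [Int.toNat_natCast]
    rw [btA_eq_specA]
    simp only [List.nil_append]
    rcases Nat.eq_zero_or_pos k with hk0 | hk1
    · -- max_L == 1
      subst hk0
      by_cases hnb : nb < mL
      · rw [if_pos (Or.inr hnb)]
        simp [specA, show ¬ (0 : Int) < nb from by omega]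
      · rw [if_neg (by omega)]
        simp [specA, show (0 : Int) < nb from by omega, segsOfB_eq_segsFrom]
    · -- max_L ≥ 2
      rw [specA_eq_combL nb k 0 hk1]
      by_cases hnb : nb < mL
      · rw [if_pos (Or.inr hnb), combL_eq_nil nb k 0 hk1 (by omega), List.map_nil]
      · rw [if_neg (by omega)]
        simp only [fold_stepB_eq_combL, PySem.List.foldl_append_singleton_eq_map,
          List.nil_append]
        simp [segsOfB_eq_segsFrom]
  · -- max_L ≤ 0: Pre_ forces num_blocks < max_L; both sides are []
    have hnb : nb < mL := hpre.resolve_left h1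
    rw [if_pos (Or.inl (by omega))]
    rw [btA.eq_def, if_neg (by omega : ¬ mL - 1 = 0), show (mL - 1).toNat = 0 from by omega]
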